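-- pv_equiv track=rewrite | github.com/timmapuramreddy/gdx-config-validator | src/gdx_config_validator/utils.py | get_column_name_suggestions
-- ===== SOURCE A (Python) =====
-- from typing import List, Dict, Any, Optional, Set
--
-- def get_column_name_suggestions(
--     available_columns: List[str], target_column: str, max_suggestions: int = 3
-- ) -> List[str]:
--     """
--     Get column name suggestions based on similarity
--
--     Args:
--         available_columns: List of available column names
--         target_column: Target column name to find matches for
--         max_suggestions: Maximum number of suggestions to return
--
--     Returns:
--         List of suggested column names
--     """
--     if not target_column or not available_columns:
--         return []
--
--     # Simple similarity matching (case-insensitive, partial matches)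
--     target_lower = target_column.lower()
--     suggestions = []
--
--     # Exact case-insensitive match
--     for col in available_columns:
--         if col.lower() == target_lower:
--             return [col]
--
--     # Partial matches
--     for col in available_columns:
--         col_lower = col.lower()
--         if target_lower in col_lower or col_lower in target_lower:
--             suggestions.append(col)
--
--     # Limit suggestions
--     return suggestions[:max_suggestions]
-- ===== SOURCE B (Python) =====
-- def get_column_name_suggestions(available_columns, target_column, max_suggestions=3):
--     if not target_column or not available_columns:
--         return []
--     target_lower = target_column.lower()
--     suggestions = []
--     # single pass: first exact (case-insensitive) match wins immediately;
--     # otherwise collect partial matches in order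
--     for col in available_columns:
--         col_lower = col.lower()
--         if col_lower == target_lower:
--             return [col]
--         if target_lower in col_lower or col_lower in target_lower:
--             suggestions.append(col)
--     return suggestions[:max_suggestions]
-- ===== Notes on version B (the rewrite author's own statement) =====
-- stated objective: alternative
-- what changed: Replaces A's two sequential scans (one for an exact case-insensitive match, one for partial matches) by a single pass that lowercases each column once, returns immediately on an exact match and otherwise accumulates partial matches, slicing at the end.
import Mathlib
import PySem

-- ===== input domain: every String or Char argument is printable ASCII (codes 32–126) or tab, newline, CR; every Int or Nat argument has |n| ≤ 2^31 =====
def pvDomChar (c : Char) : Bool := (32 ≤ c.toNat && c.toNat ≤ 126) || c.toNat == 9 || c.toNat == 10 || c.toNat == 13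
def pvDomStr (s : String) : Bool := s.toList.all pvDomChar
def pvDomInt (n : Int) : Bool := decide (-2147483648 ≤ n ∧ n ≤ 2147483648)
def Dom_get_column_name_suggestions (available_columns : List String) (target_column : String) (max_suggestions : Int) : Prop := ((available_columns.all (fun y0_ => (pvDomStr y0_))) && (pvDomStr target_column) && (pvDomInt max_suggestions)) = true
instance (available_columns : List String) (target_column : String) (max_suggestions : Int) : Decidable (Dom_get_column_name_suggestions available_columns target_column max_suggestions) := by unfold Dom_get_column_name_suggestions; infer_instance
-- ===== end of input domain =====

-- B fuses A's two scans into one pass (exact match returns early, partials accumulate); alternative decomposition, same results.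
-- ===== PORT A =====
-- first loop of A: scan for a case-insensitive exact match
def pvA_exact (t : String) : List String → Option String
  | [] => none
  | c :: cs => if PySem.Str.lower c = t then some c else pvA_exact t cs

-- second loop of A: collect partial matches in order
def pvA_partial (t : String) : List String → List String
  | [] => []
  | c :: cs =>
    let cl := PySem.Str.lower c
    if PySem.Str.isIn t cl || PySem.Str.isIn cl t then c :: pvA_partial t cs else pvA_partial t cs

def get_column_name_suggestions (available_columns : List String) (target_column : String) (max_suggestions : Int) : List String :=
  if target_column.toList.isEmpty || available_columns.isEmpty then []
  else
    let target_lower := PySem.Str.lower target_column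
    match pvA_exact target_lower available_columns with
    | some c => [c]
    | none => PySem.List.slice (pvA_partial target_lower available_columns) none (some max_suggestions)

-- ===== PORT B =====
-- B's single loop: .inl = early return on exact match, .inr = accumulated partial matches
def pvB_loop (t : String) : List String → List String → List String ⊕ List String
  | [], acc => .inr acc
  | c :: cs, acc =>
    let cl := PySem.Str.lower c
    if cl = t then .inl [c]
    else if PySem.Str.isIn t cl || PySem.Str.isIn cl t then pvB_loop t cs (acc ++ [c])
    else pvB_loop t cs acc

def get_column_name_suggestions_alt (available_columns : List String) (target_column : String) (max_suggestions : Int) : List String :=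
  if target_column.toList.isEmpty || available_columns.isEmpty then []
  else
    match pvB_loop (PySem.Str.lower target_column) available_columns [] with
    | .inl r => r
    | .inr suggestions => PySem.List.slice suggestions none (some max_suggestions)

-- ===== PRECONDITION & SPEC =====
def Spec_get_column_name_suggestions (available_columns : List String) (target_column : String) (max_suggestions : Int) (out : List String) : Prop := out = get_column_name_suggestions_alt available_columns target_column max_suggestions
instance (available_columns : List String) (target_column : String) (max_suggestions : Int) (out : List String) : Decidable (Spec_get_column_name_suggestions available_columns target_column max_suggestions out) := by unfold Spec_get_column_name_suggestions; infer_instance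

-- ===== CLAIM (what is proved, stated in full; the proofs are below) =====
def Claim_equal_get_column_name_suggestions : Prop := ∀ (available_columns : List String) (target_column : String) (max_suggestions : Int), Dom_get_column_name_suggestions available_columns target_column max_suggestions → Spec_get_column_name_suggestions available_columns target_column max_suggestions (get_column_name_suggestions available_columns target_column max_suggestions)

-- ===== LEMMAS AND PROOFS =====

-- ===== VERDICT (by name: the statement is the Claim_ definition above) =====
lemma pvB_loop_char (t : String) (cols : List String) : ∀ acc : List String,
    pvB_loop t cols acc =
      match pvA_exact t cols with
      | some c => .inl [c]
      | none => .inr (acc ++ pvA_partial t cols) := by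
  induction cols with
  | nil => intro acc; simp [pvB_loop, pvA_exact, pvA_partial]
  | cons c cs ih =>
    intro acc
    simp only [pvB_loop, pvA_exact, pvA_partial]
    by_cases h1 : PySem.Str.lower c = t
    · simp [h1]
    · simp only [h1, if_false]
      by_cases h2 : PySem.Str.isIn t (PySem.Str.lower c) || PySem.Str.isIn (PySem.Str.lower c) t
      · simp only [h2, if_true, ih]
        cases pvA_exact t cs <;> simp
      · simp only [h2, ih]
        cases pvA_exact t cs <;> simp

theorem get_column_name_suggestions_spec : Claim_equal_get_column_name_suggestions := by
  intro cols t m _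
  unfold Spec_get_column_name_suggestions get_column_name_suggestions get_column_name_suggestions_alt
  by_cases hg : t.toList.isEmpty || cols.isEmpty
  · simp [hg]
  · simp only [hg, Bool.false_eq_true, if_false, pvB_loop_char]
    cases pvA_exact (PySem.Str.lower t) cols <;> simp
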